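-- pv_equiv track=rewrite | github.com/Barebore/Algorithms | Tinkoff tasks/new_task/4 copy.py | boring_check
-- ===== SOURCE A (Python) =====
-- from collections import defaultdict
--
-- def boring_check(a: list):
--     '''
--     Выводит максимальное l, что префикс длины l массива является скучным.
--     Набор чисел является скучным, если из  него можно удалить один элемент так,
--     чтобы каждое число в нём встречалось одинаковое количество раз.
--
--     >>> boring_check(1, 2, 3, 1, 2, 2, 3, 3, 3, 1, 4, 4, 5)
--     10
--
--     >>> boring_check(1, 2, 4, 2, 3, 1, 3, 9, 15, 23)
--     7
--
--     >>> boring_check(1, 2, 3, 4, 5)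
--     5
--     '''
--     n = len(a)
--
--     counts = defaultdict(int)
--     for x in a:
--         counts[x] += 1
--
--     def is_boring_prefix(l):
--         prefix_counts = defaultdict(int)
--         freq_counts = [0]*(n+1)
--         for i in range(l):
--             prefix_counts[a[i]] += 1
--             freq_counts[prefix_counts[a[i]]] += 1
--         max_count = max(prefix_counts.values())
--         min_count = min(prefix_counts.values())
--         if max_count == min_count or (max_count == min_count + 1 and freq_counts[max_count] == 1):
--             # This prefix is boring
--             return True
--         for i in range(l, n):
--             prefix_counts[a[i-l]] -= 1
--             freq_counts[prefix_counts[a[i-l]]+1] -= 1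
--             if prefix_counts[a[i-l]] == 0:
--                 del prefix_counts[a[i-l]]
--             prefix_counts[a[i]] += 1
--             freq_counts[prefix_counts[a[i]]] += 1
--             max_count = max(prefix_counts.values())
--             min_count = min(prefix_counts.values())
--             if max_count == min_count or (max_count == min_count + 1 and freq_counts[max_count] == 1):
--                 # This prefix is boring
--                 return True
--         # This prefix is not boring
--         return False
--
--     # Binary search for the maximum boring prefix length
--     left = 0
--     right = n
--     while left < right:
--         mid = (left + right + 1) // 2
--         if is_boring_prefix(mid):
--             left = mid
--         else:
--             right = mid - 1
--     return left
-- ===== SOURCE B (Python) =====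
-- # B: same binary search over candidate lengths, but the per-length sliding-window
-- # check keeps the maximal count and the "how many keys have count >= c" table
-- # incrementally (O(1) per window) instead of rescanning all dict values for
-- # max/min at every window, dropping a factor of (distinct values) per check.
-- from collections import defaultdict
--
--
-- def boring_check(a: list):
--     n = len(a)
--
--     def ok(fr, mc):
--         # window is "boring" iff all counts equal, or exactly one key sits one
--         # above all the others.  fr[c] = number of keys with count >= c, so
--         # fr[1] = number of distinct keys in the window.
--         return fr[mc] == fr[1] or (mc >= 2 and fr[mc] == 1 and fr[mc - 1] == fr[1])
--
--     def has_boring_window(l):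
--         cnt = defaultdict(int)
--         fr = [0] * (n + 1)
--         mc = 0
--         for i in range(l):
--             cnt[a[i]] += 1
--             c = cnt[a[i]]
--             fr[c] += 1
--             if c > mc:
--                 mc = c
--         if ok(fr, mc):
--             return True
--         for i in range(l, n):
--             x = a[i - l]
--             cnt[x] -= 1
--             c = cnt[x]
--             fr[c + 1] -= 1
--             if c == 0:
--                 del cnt[x]
--             if c + 1 == mc and fr[mc] == 0:
--                 mc -= 1
--             y = a[i]
--             cnt[y] += 1
--             c2 = cnt[y]
--             fr[c2] += 1
--             if c2 > mc:
--                 mc = c2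
--             if ok(fr, mc):
--                 return True
--         return False
--
--     left = 0
--     right = n
--     while left < right:
--         mid = (left + right + 1) // 2
--         if has_boring_window(mid):
--             left = mid
--         else:
--             right = mid - 1
--     return left
-- ===== Notes on version B (the rewrite author's own statement) =====
-- stated objective: faster
-- what changed: The per-length sliding-window check now maintains the maximal count and a '#keys with count >= c' table incrementally in O(1) per window, instead of rescanning all dict values with max()/min() at every window position.
import Mathlib
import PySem

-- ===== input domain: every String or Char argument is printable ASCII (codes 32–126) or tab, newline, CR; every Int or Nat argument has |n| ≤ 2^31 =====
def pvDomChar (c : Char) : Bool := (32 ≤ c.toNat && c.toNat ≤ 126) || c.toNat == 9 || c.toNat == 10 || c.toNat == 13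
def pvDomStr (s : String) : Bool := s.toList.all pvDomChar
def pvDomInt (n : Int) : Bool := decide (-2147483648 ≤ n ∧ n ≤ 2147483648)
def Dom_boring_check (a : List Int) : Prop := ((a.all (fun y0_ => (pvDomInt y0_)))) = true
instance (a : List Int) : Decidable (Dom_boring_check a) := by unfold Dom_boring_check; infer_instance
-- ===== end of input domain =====

-- B replaces A's per-window rescan of all dict values (max/min) by O(1) bookkeeping
-- (max count + "#keys with count ≥ c" table); same binary-search driver, same results.

-- ===== PORT A =====
-- shared indexing helpers (both Pythons index a[i] / freq_counts[i] the same way;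
-- every executed index is in range — see the comments at each use site):
-- a[i] for 0 ≤ i < len(a):
def pvGetA (a : List Int) (i : Nat) : Int := a.getD i 0
-- freq_counts[i] read / write; every executed i satisfies 1 ≤ i ≤ n < len(freq_counts)
def pvFrG (fr : List Int) (i : Int) : Int := (PySem.List.pyGet? fr i).getD 0
def pvFrS (fr : List Int) (i v : Int) : List Int := fr.set i.toNat v

-- prefix_counts[a[i]] += 1 ; freq_counts[prefix_counts[a[i]]] += 1
def pvStepAddA (st : PySem.Dict Int Int × List Int) (x : Int) : PySem.Dict Int Int × List Int :=
  let pc := st.1.modify x 0 (· + 1)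
  let c := pc.getD x 0
  (pc, pvFrS st.2 c (pvFrG st.2 c + 1))

-- prefix_counts[x] -= 1 ; freq_counts[prefix_counts[x]+1] -= 1 ; if prefix_counts[x] == 0: del
def pvStepRemA (st : PySem.Dict Int Int × List Int) (x : Int) : PySem.Dict Int Int × List Int :=
  let pc := st.1.modify x 0 (· - 1)
  let c := pc.getD x 0
  let fr := pvFrS st.2 (c + 1) (pvFrG st.2 (c + 1) - 1)
  (if c == 0 then pc.erase x else pc, fr)

-- max_count == min_count or (max_count == min_count + 1 and freq_counts[max_count] == 1)
-- (prefix_counts is nonempty whenever this runs, so .getD 0 after max?/min? is never used)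
def pvCondA (pc : PySem.Dict Int Int) (fr : List Int) : Bool :=
  let mx := ((PySem.List.max? pc.values id).getD 0)
  let mn := ((PySem.List.min? pc.values id).getD 0)
  (mx == mn) || (mx == mn + 1 && pvFrG fr mx == 1)

-- the 'for i in range(l, n)' loop with early return
def pvSlideA (a : List Int) (n l : Nat) (pc : PySem.Dict Int Int) (fr : List Int) (i : Nat) : Bool :=
  if _h : i < n then
    let st1 := pvStepRemA (pc, fr) (pvGetA a (i - l))
    let st2 := pvStepAddA st1 (pvGetA a i)
    if pvCondA st2.1 st2.2 then true else pvSlideA a n l st2.1 st2.2 (i + 1)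
  else false
termination_by n - i

-- is_boring_prefix(l)
def pvIsBorA (a : List Int) (n l : Nat) : Bool :=
  let st := (List.range l).foldl (fun st i => pvStepAddA st (pvGetA a i))
              (PySem.Dict.empty, List.replicate (n + 1) (0 : Int))
  if pvCondA st.1 st.2 then true else pvSlideA a n l st.1 st.2 l

-- the binary-search loop (left, right, mid are nonnegative, so Nat '/' is Python's '//')
def pvBSA (a : List Int) (n left right : Nat) : Nat :=
  if _h : left < right then
    let mid := (left + right + 1) / 2
    if pvIsBorA a n mid then pvBSA a n mid right else pvBSA a n left (mid - 1)
  else left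
termination_by right - left
decreasing_by
  · omega
  · omega

def boring_check (a : List Int) : Int :=
  let n := a.length
  let _counts := PySem.Dict.counter a   -- A builds `counts` and never uses it
  ((pvBSA a n 0 n : Nat) : Int)

-- ===== PORT B =====
-- fr[mc] == fr[1] or (mc >= 2 and fr[mc] == 1 and fr[mc-1] == fr[1])
def pvOkB (fr : List Int) (mc : Int) : Bool :=
  (pvFrG fr mc == pvFrG fr 1) ||
    (decide (2 ≤ mc) && pvFrG fr mc == 1 && pvFrG fr (mc - 1) == pvFrG fr 1)

-- cnt[y] += 1; c = cnt[y]; fr[c] += 1; if c > mc: mc = c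
def pvStepAddB (st : PySem.Dict Int Int × List Int × Int) (y : Int) :
    PySem.Dict Int Int × List Int × Int :=
  let pc := st.1.modify y 0 (· + 1)
  let c := pc.getD y 0
  let fr := pvFrS st.2.1 c (pvFrG st.2.1 c + 1)
  (pc, fr, if st.2.2 < c then c else st.2.2)

-- cnt[x] -= 1; c = cnt[x]; fr[c+1] -= 1; if c == 0: del cnt[x];
-- if c + 1 == mc and fr[mc] == 0: mc -= 1
def pvStepRemB (st : PySem.Dict Int Int × List Int × Int) (x : Int) :
    PySem.Dict Int Int × List Int × Int :=
  let pc := st.1.modify x 0 (· - 1)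
  let c := pc.getD x 0
  let fr := pvFrS st.2.1 (c + 1) (pvFrG st.2.1 (c + 1) - 1)
  (if c == 0 then pc.erase x else pc,
   fr,
   if c + 1 == st.2.2 && pvFrG fr st.2.2 == 0 then st.2.2 - 1 else st.2.2)

def pvSlideB (a : List Int) (n l : Nat) (pc : PySem.Dict Int Int) (fr : List Int) (mc : Int)
    (i : Nat) : Bool :=
  if _h : i < n then
    let st1 := pvStepRemB (pc, fr, mc) (pvGetA a (i - l))
    let st2 := pvStepAddB st1 (pvGetA a i)
    if pvOkB st2.2.1 st2.2.2 then true else pvSlideB a n l st2.1 st2.2.1 st2.2.2 (i + 1)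
  else false
termination_by n - i

-- has_boring_window(l)
def pvIsBorB (a : List Int) (n l : Nat) : Bool :=
  let st := (List.range l).foldl (fun st i => pvStepAddB st (pvGetA a i))
              (PySem.Dict.empty, List.replicate (n + 1) (0 : Int), (0 : Int))
  if pvOkB st.2.1 st.2.2 then true else pvSlideB a n l st.1 st.2.1 st.2.2 l

def pvBSB (a : List Int) (n left right : Nat) : Nat :=
  if _h : left < right then
    let mid := (left + right + 1) / 2
    if pvIsBorB a n mid then pvBSB a n mid right else pvBSB a n left (mid - 1)
  else left
termination_by right - left
decreasing_by
  · omega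
  · omega

def boring_check_alt (a : List Int) : Int :=
  let n := a.length
  ((pvBSB a n 0 n : Nat) : Int)

-- ===== PRECONDITION & SPEC =====
def Spec_boring_check (a : List Int) (out : Int) : Prop := out = boring_check_alt a
instance (a : List Int) (out : Int) : Decidable (Spec_boring_check a out) := by
  unfold Spec_boring_check; infer_instance

-- ===== CLAIM (what is proved, stated in full; the proofs are below) =====
def Claim_equal_boring_check : Prop := ∀ (a : List Int), Dom_boring_check a → Spec_boring_check a (boring_check a)

-- ===== LEMMAS AND PROOFS =====

theorem pvFrG_natCast (fr : List Int) (c : Nat) : pvFrG fr (c : Int) = fr.getD c 0 := by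
  simp [pvFrG, PySem.List.pyGet?_natCast, List.getD_eq_getElem?_getD]

theorem pvFrS_length (fr : List Int) (i v : Int) : (pvFrS fr i v).length = fr.length := by
  simp [pvFrS]

theorem pvFrG_pvFrS_nat (fr : List Int) (i : Nat) (hi : i < fr.length) (v : Int) (j : Nat) :
    pvFrG (pvFrS fr (i : Int) v) (j : Int) = if j = i then v else pvFrG fr (j : Int) := by
  simp only [pvFrG_natCast, pvFrS, Int.toNat_natCast]
  rcases eq_or_ne j i with rfl | h
  · simp [List.getD_eq_getElem?_getD, hi]
  · simp [List.getD_eq_getElem?_getD, List.getElem?_set_ne (Ne.symm h), h]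

theorem pvMem_keys_erase (d : PySem.Dict Int Int) (k j : Int) :
    j ∈ (d.erase k).keys ↔ j ∈ d.keys ∧ j ≠ k := by
  simp only [PySem.Dict.erase, PySem.Dict.keys, List.mem_map, List.mem_filter]
  constructor
  · rintro ⟨p, ⟨hp, hpk⟩, rfl⟩
    exact ⟨⟨p, hp, rfl⟩, by simpa using hpk⟩
  · rintro ⟨⟨p, hp, rfl⟩, hne⟩
    exact ⟨p, ⟨hp, by simpa using hne⟩, rfl⟩

theorem pvNodup_keys_erase (d : PySem.Dict Int Int) (k : Int) (h : d.keys.Nodup) :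
    (d.erase k).keys.Nodup := by
  have : (d.erase k).keys.Sublist d.keys := by
    simpa [PySem.Dict.erase, PySem.Dict.keys] using List.Sublist.map (fun p : Int × Int => p.1) (List.filter_sublist (l := d.items))
  exact this.nodup h

theorem pvGet?_erase (d : PySem.Dict Int Int) (k j : Int) :
    (d.erase k).get? j = if j = k then none else d.get? j := by
  obtain ⟨items⟩ := d
  simp only [PySem.Dict.erase, PySem.Dict.get?]
  induction items with
  | nil => simp
  | cons p rest ih =>
    by_cases hpk : p.1 = k <;> by_cases hpj : p.1 = j <;>
      simp_all

theorem pvGetD_erase (d : PySem.Dict Int Int) (k j : Int) :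
    (d.erase k).getD j 0 = if j = k then 0 else d.getD j 0 := by
  simp [PySem.Dict.getD, pvGet?_erase]
  split <;> rfl

theorem pvMax?_spec (xs : List Int) (hne : xs ≠ []) :
    ∃ m, PySem.List.max? xs id = some m ∧ m ∈ xs ∧ ∀ v ∈ xs, v ≤ m := by
  rcases h : PySem.List.max? xs id with _ | m
  · exact absurd ((PySem.List.max?_eq_none_iff xs id).mp h) hne
  · exact ⟨m, rfl, PySem.List.max?_mem h, fun v hv => PySem.List.max?_isMax h v hv⟩

theorem pvMin?_spec (xs : List Int) (hne : xs ≠ []) :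
    ∃ m, PySem.List.min? xs id = some m ∧ m ∈ xs ∧ ∀ v ∈ xs, m ≤ v := by
  rcases h : PySem.List.min? xs id with _ | m
  · exact absurd ((PySem.List.min?_eq_none_iff xs id).mp h) hne
  · exact ⟨m, rfl, PySem.List.min?_mem h, fun v hv => PySem.List.min?_isMin h v hv⟩

def pvDge (w : List Int) (c : Nat) : Nat := w.dedup.countP (fun k => decide (c ≤ w.count k))

theorem pvDge_step (u v : List Int) (y : Int)
    (hcnt : ∀ k, v.count k = u.count k + (if k = y then 1 else 0)) (c : Nat) (hc : 1 ≤ c) :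
    pvDge v c = pvDge u c + (if c = u.count y + 1 then 1 else 0) := by
  have hmem : ∀ k : Int, k ∈ v ↔ k ∈ u ∨ k = y := by
    intro k
    rw [← List.count_pos_iff, ← List.count_pos_iff, hcnt k]
    rcases eq_or_ne k y with rfl | h
    · simp
    · simp [h]
  have hcong : ∀ (m : List Int), (∀ k ∈ m, k ≠ y) →
      m.countP (fun k => decide (c ≤ v.count k)) = m.countP (fun k => decide (c ≤ u.count k)) := by
    intro m hm
    apply List.countP_congr
    intro k hk
    rw [hcnt k, if_neg (hm k hk), Nat.add_zero]
  by_cases hy : y ∈ u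
  · have hvperm : v.dedup.Perm u.dedup := by
      rw [List.perm_ext_iff_of_nodup (List.nodup_dedup v) (List.nodup_dedup u)]
      intro k
      simp only [List.mem_dedup, hmem k]
      constructor
      · rintro (h | rfl)
        · exact h
        · exact hy
      · exact Or.inl
    have hy' : y ∈ u.dedup := List.mem_dedup.mpr hy
    have hperm := List.perm_cons_erase hy'
    unfold pvDge
    rw [hvperm.countP_eq, hperm.countP_eq, hperm.countP_eq, List.countP_cons, List.countP_cons]
    have herase := hcong (u.dedup.erase y)
      (fun k hk => ((List.Nodup.mem_erase_iff (List.nodup_dedup u)).mp hk).1)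
    rw [herase, hcnt y, if_pos rfl]
    simp only [decide_eq_true_eq]
    split_ifs <;> omega
  · have hcy : u.count y = 0 := List.count_eq_zero_of_not_mem hy
    have hvperm : v.dedup.Perm (y :: u.dedup) := by
      rw [List.perm_ext_iff_of_nodup (List.nodup_dedup v)
        (List.nodup_cons.mpr ⟨fun h => hy (List.mem_dedup.mp h), List.nodup_dedup u⟩)]
      intro k
      simp only [List.mem_dedup, hmem k, List.mem_cons]
      tauto
    unfold pvDge
    rw [hvperm.countP_eq, List.countP_cons]
    have herase := hcong u.dedup (fun k hk => fun hky => hy (hky ▸ List.mem_dedup.mp hk))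
    rw [herase, hcnt y, if_pos rfl, hcy]
    simp only [decide_eq_true_eq]
    split_ifs <;> omega

theorem pvDge_snoc (w : List Int) (y : Int) (c : Nat) (hc : 1 ≤ c) :
    pvDge (w ++ [y]) c = pvDge w c + (if c = w.count y + 1 then 1 else 0) := by
  apply pvDge_step w _ y _ c hc
  intro k
  rcases eq_or_ne k y with rfl | h
  · simp [List.count_append]
  · rw [List.count_append, if_neg h]
    have h0 : List.count k [y] = 0 := List.count_eq_zero.mpr (by simp [h])
    omega

theorem pvDge_cons (t : List Int) (x : Int) (c : Nat) (hc : 1 ≤ c) :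
    pvDge (x :: t) c = pvDge t c + (if c = t.count x + 1 then 1 else 0) := by
  apply pvDge_step t _ x _ c hc
  intro k
  rcases eq_or_ne k x with rfl | h
  · simp
  · rw [if_neg h]
    simp [Ne.symm h]

theorem pvDge_one (w : List Int) : pvDge w 1 = w.dedup.length := by
  apply List.countP_eq_length.mpr
  intro k hk
  simpa using List.count_pos_iff.mpr (List.mem_dedup.mp hk)

theorem pvDge_all_iff (w : List Int) (c : Nat) :
    pvDge w c = pvDge w 1 ↔ ∀ k ∈ w, c ≤ w.count k := by
  rw [pvDge_one]
  unfold pvDge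
  rw [List.countP_eq_length]
  constructor
  · intro h k hk
    simpa using h k (List.mem_dedup.mpr hk)
  · intro h k hk
    simpa using h k (List.mem_dedup.mp hk)

theorem pvDge_pos (w : List Int) (c : Nat) (k : Int) (hk : k ∈ w) (hc : c ≤ w.count k) :
    1 ≤ pvDge w c :=
  List.countP_pos_iff.mpr ⟨k, List.mem_dedup.mpr hk, by simpa using hc⟩

-- #distinct values of w occurring at least c times in w (spec used by the invariant)


-- the joint loop invariant: pc is the counter of the window w, fr tabulates pvDge, mc is the max count
def pvInv (n : Nat) (w : List Int) (pc : PySem.Dict Int Int) (fr : List Int) (mc : Int) : Prop :=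
  pc.keys.Nodup ∧
  (∀ k : Int, k ∈ pc.keys ↔ k ∈ w) ∧
  (∀ k : Int, pc.getD k 0 = (w.count k : Int)) ∧
  fr.length = n + 1 ∧
  (∀ c : Nat, 1 ≤ c → c ≤ n → pvFrG fr (c : Int) = (pvDge w c : Int)) ∧
  (∀ k ∈ w, (w.count k : Int) ≤ mc) ∧
  (w = [] → mc = 0) ∧ (w ≠ [] → ∃ k ∈ w, (w.count k : Int) = mc) ∧
  w.length ≤ n

theorem pvAdd_inv (n : Nat) (w : List Int) (pc : PySem.Dict Int Int) (fr : List Int) (mc : Int)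
    (y : Int) (h : pvInv n w pc fr mc) (hlen : w.length < n) :
    pvInv n (w ++ [y]) (pvStepAddB (pc, fr, mc) y).1 (pvStepAddB (pc, fr, mc) y).2.1
      (pvStepAddB (pc, fr, mc) y).2.2 := by
  obtain ⟨hnd, hmem, hcnt, hlfr, hfr, hub, hemp, hex, hwn⟩ := h
  have hcyle : w.count y ≤ w.length := List.count_le_length
  have hkey : pvStepAddB (pc, fr, mc) y =
      (pc.insert y ((w.count y + 1 : Nat) : Int),
       pvFrS fr ((w.count y + 1 : Nat) : Int) (pvFrG fr ((w.count y + 1 : Nat) : Int) + 1),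
       if mc < ((w.count y + 1 : Nat) : Int) then ((w.count y + 1 : Nat) : Int) else mc) := by
    have hg : pc.getD y 0 + 1 = ((w.count y + 1 : Nat) : Int) := by
      rw [hcnt y]; push_cast; ring
    simp only [pvStepAddB, PySem.Dict.modify, PySem.Dict.getD_insert_self, hg]
  rw [hkey]
  dsimp only
  have hcnt' : ∀ k : Int, (w ++ [y]).count k = w.count k + (if k = y then 1 else 0) := by
    intro k
    rcases eq_or_ne k y with rfl | hne
    · simp [List.count_append]
    · rw [List.count_append, if_neg hne]
      have h0 : List.count k [y] = 0 := List.count_eq_zero.mpr (by simp [hne])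
      omega
  refine ⟨PySem.Dict.nodup_keys_insert _ _ _ hnd, ?_, ?_, ?_, ?_, ?_, ?_, ?_, ?_⟩
  · intro k
    rw [PySem.Dict.mem_keys_insert]
    simp only [List.mem_append, List.mem_singleton, hmem k]
    tauto
  · intro k
    rw [PySem.Dict.getD_insert, hcnt' k]
    rcases eq_or_ne k y with rfl | hne
    · simp
    · rw [if_neg hne, if_neg hne, hcnt k]
      push_cast; ring
  · rw [pvFrS_length]; exact hlfr
  · intro c hc1 hcn
    have hin : w.count y + 1 < fr.length := by omega
    rw [pvFrG_pvFrS_nat fr (w.count y + 1) hin _ c, pvDge_snoc w y c hc1]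
    rcases eq_or_ne c (w.count y + 1) with rfl | hne
    · rw [if_pos rfl, if_pos rfl, hfr (w.count y + 1) (by omega) (by omega)]
      push_cast; ring
    · rw [if_neg hne, if_neg hne, hfr c hc1 hcn]
      simp
  · intro k hk
    rw [hcnt' k]
    have hmc : mc ≤ (if mc < ((w.count y + 1 : Nat) : Int) then ((w.count y + 1 : Nat) : Int) else mc) := by
      split <;> omega
    rcases eq_or_ne k y with rfl | hne
    · rw [if_pos rfl]
      split <;> omega
    · rw [if_neg hne, Nat.add_zero]
      have hkw : k ∈ w := by
        rcases List.mem_append.mp hk with h | h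
        · exact h
        · exact absurd (List.mem_singleton.mp h) hne
      exact le_trans (hub k hkw) hmc
  · intro habs
    exact absurd habs (by simp)
  · intro _
    split
    · refine ⟨y, by simp, ?_⟩
      rw [hcnt' y, if_pos rfl]
    · rename_i hge
      rw [not_lt] at hge
      have hwne : w ≠ [] := by
        rintro rfl
        have hmc0 := hemp rfl
        simp only [List.count_nil] at hge
        omega
      obtain ⟨k, hkw, hkc⟩ := hex hwne
      have hkne : k ≠ y := by
        rintro rfl
        omega
      refine ⟨k, List.mem_append.mpr (Or.inl hkw), ?_⟩
      rw [hcnt' k, if_neg hkne, Nat.add_zero, hkc]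
  · simp; omega

theorem pvRem_inv (n : Nat) (x : Int) (t : List Int) (pc : PySem.Dict Int Int) (fr : List Int)
    (mc : Int) (h : pvInv n (x :: t) pc fr mc) :
    pvInv n t (pvStepRemB (pc, fr, mc) x).1 (pvStepRemB (pc, fr, mc) x).2.1
      (pvStepRemB (pc, fr, mc) x).2.2 := by
  obtain ⟨hnd, hmem, hcnt, hlfr, hfr, hub, hemp, hex, hwn⟩ := h
  have hw_cnt : ∀ k : Int, (x :: t).count k = t.count k + (if k = x then 1 else 0) := by
    intro k
    rcases eq_or_ne k x with rfl | hne
    · simp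
    · rw [if_neg hne]
      simp [Ne.symm hne]
  have hctle : t.count x ≤ t.length := List.count_le_length
  have hlw : (x :: t).length = t.length + 1 := by simp
  have hwn' : t.length + 1 ≤ n := by omega
  -- the state after the removal step, with all counts written as Nat casts
  have hkey : pvStepRemB (pc, fr, mc) x =
      (if ((t.count x : Nat) : Int) == 0 then (pc.insert x ((t.count x : Nat) : Int)).erase x
         else pc.insert x ((t.count x : Nat) : Int),
       pvFrS fr ((t.count x + 1 : Nat) : Int) (pvFrG fr ((t.count x + 1 : Nat) : Int) - 1),
       if (((t.count x + 1 : Nat) : Int) == mc &&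
           pvFrG (pvFrS fr ((t.count x + 1 : Nat) : Int)
             (pvFrG fr ((t.count x + 1 : Nat) : Int) - 1)) mc == 0) then mc - 1 else mc) := by
    have e1 : pc.getD x 0 - 1 = ((t.count x : Nat) : Int) := by
      rw [hcnt x, hw_cnt x, if_pos rfl]; push_cast; ring
    have e2 : ((t.count x : Nat) : Int) + 1 = ((t.count x + 1 : Nat) : Int) := by push_cast; ring
    simp only [pvStepRemB, PySem.Dict.modify, PySem.Dict.getD_insert_self, e1, e2]
  rw [hkey]
  dsimp only
  -- abbreviations
  obtain ⟨k0, hk0w, hk0c⟩ := hex (List.cons_ne_nil x t)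
  have hMle : (x :: t).count k0 ≤ n := le_trans List.count_le_length (by omega)
  have hM1 : 1 ≤ (x :: t).count k0 := List.count_pos_iff.mpr hk0w
  have hfrin : t.count x + 1 < fr.length := by omega
  have hfr1_at : ∀ c : Nat, 1 ≤ c → c ≤ n →
      pvFrG (pvFrS fr ((t.count x + 1 : Nat) : Int)
        (pvFrG fr ((t.count x + 1 : Nat) : Int) - 1)) (c : Int) = ((pvDge t c : Nat) : Int) := by
    intro c hc1 hcn
    rw [pvFrG_pvFrS_nat fr (t.count x + 1) hfrin _ c]
    rcases eq_or_ne c (t.count x + 1) with rfl | hne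
    · rw [if_pos rfl, hfr (t.count x + 1) (by omega) (by omega)]
      rw [pvDge_cons t x (t.count x + 1) (by omega), if_pos rfl]
      push_cast; ring
    · rw [if_neg hne, hfr c hc1 hcn, pvDge_cons t x c hc1, if_neg hne]
      simp
  have hfrmc : pvFrG (pvFrS fr ((t.count x + 1 : Nat) : Int)
      (pvFrG fr ((t.count x + 1 : Nat) : Int) - 1)) mc = ((pvDge t ((x :: t).count k0) : Nat) : Int) := by
    rw [← hk0c]
    exact hfr1_at ((x :: t).count k0) hM1 hMle
  have hcond : ((((t.count x + 1 : Nat) : Int) == mc &&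
      pvFrG (pvFrS fr ((t.count x + 1 : Nat) : Int)
        (pvFrG fr ((t.count x + 1 : Nat) : Int) - 1)) mc == 0) = true) ↔
      ((x :: t).count k0 = t.count x + 1 ∧ pvDge t ((x :: t).count k0) = 0) := by
    rw [hfrmc, ← hk0c]
    simp only [Bool.and_eq_true, beq_iff_eq]
    constructor
    · rintro ⟨h1, h2⟩
      exact ⟨by exact_mod_cast h1.symm, by exact_mod_cast h2⟩
    · rintro ⟨h1, h2⟩
      exact ⟨by exact_mod_cast h1.symm, by exact_mod_cast congrArg (Nat.cast : Nat → Int) h2⟩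
  have hDgeW : pvDge (x :: t) ((x :: t).count k0) =
      pvDge t ((x :: t).count k0) + (if (x :: t).count k0 = t.count x + 1 then 1 else 0) :=
    pvDge_cons t x _ hM1
  have hDgeWpos : 1 ≤ pvDge (x :: t) ((x :: t).count k0) :=
    pvDge_pos _ _ k0 hk0w le_rfl
  refine ⟨?_, ?_, ?_, ?_, ?_, ?_, ?_, ?_, by omega⟩
  · -- keys nodup
    split
    · exact pvNodup_keys_erase _ _ (PySem.Dict.nodup_keys_insert _ _ _ hnd)
    · exact PySem.Dict.nodup_keys_insert _ _ _ hnd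
  · -- key membership = membership in t
    intro k
    split
    · rename_i hct0
      have hct0' : t.count x = 0 := by
        have := beq_iff_eq.mp hct0
        exact_mod_cast this
      have hxnt : x ∉ t := List.count_eq_zero.mp hct0'
      rw [pvMem_keys_erase]
      rw [PySem.Dict.mem_keys_insert]
      constructor
      · rintro ⟨hx | hpc, hne⟩
        · exact absurd hx hne
        · rcases List.mem_cons.mp ((hmem k).mp hpc) with rfl | ht
          · exact absurd rfl hne
          · exact ht
      · intro hkt
        have hne : k ≠ x := fun hkx => hxnt (hkx ▸ hkt)
        exact ⟨Or.inr ((hmem k).mpr (List.mem_cons_of_mem _ hkt)), hne⟩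
    · rename_i hct0
      have hct0' : t.count x ≠ 0 := by
        intro h0
        exact hct0 (by simp [h0])
      have hxt : x ∈ t := List.count_pos_iff.mp (by omega)
      rw [PySem.Dict.mem_keys_insert]
      constructor
      · rintro (rfl | hpc)
        · exact hxt
        · rcases List.mem_cons.mp ((hmem k).mp hpc) with rfl | ht
          · exact hxt
          · exact ht
      · intro hkt
        exact Or.inr ((hmem k).mpr (List.mem_cons_of_mem _ hkt))
  · -- getD = count in t
    intro k
    rcases eq_or_ne k x with rfl | hne
    · split
      · rename_i hct0
        have hct0' : t.count k = 0 := by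
          have := beq_iff_eq.mp hct0
          exact_mod_cast this
        rw [pvGetD_erase, if_pos rfl, hct0']
        simp
      · rw [PySem.Dict.getD_insert_self]
    · have hcnt_t : pc.getD k 0 = ((t.count k : Nat) : Int) := by
        rw [hcnt k, hw_cnt k, if_neg hne]
        simp
      split
      · rw [pvGetD_erase, if_neg hne, PySem.Dict.getD_insert, if_neg hne, hcnt_t]
      · rw [PySem.Dict.getD_insert, if_neg hne, hcnt_t]
  · rw [pvFrS_length]; exact hlfr
  · exact hfr1_at
  · -- upper bound
    intro k hkt
    split
    · rename_i hfire
      obtain ⟨hA, hB⟩ := hcond.mp hfire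
      have hnone : ∀ j ∈ t, ¬ ((x :: t).count k0 ≤ t.count j) := by
        intro j hj hge
        exact absurd (pvDge_pos t _ j hj hge) (by omega)
      have := hnone k hkt
      rw [← hk0c]
      have hle : t.count k ≤ (x :: t).count k0 - 1 := by omega
      omega
    · rename_i hfire
      have hle : t.count k ≤ (x :: t).count k := by rw [hw_cnt k]; omega
      have := hub k (List.mem_cons_of_mem _ hkt)
      have hc : ((t.count k : Nat) : Int) ≤ ((((x :: t).count k) : Nat) : Int) := by
        exact_mod_cast hle
      omega
  · -- t = [] → mc1 = 0
    rintro rfl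
    have hk0x : k0 = x := List.mem_singleton.mp hk0w
    subst hk0x
    have hM : ([k0].count k0) = 1 := by simp
    have hct : ([] : List Int).count k0 = 0 := by simp
    split
    · rename_i hfire
      rw [← hk0c, hM]
      simp
    · rename_i hfire
      exfalso
      apply hfire
      rw [hcond]
      refine ⟨by simp [hct], ?_⟩
      rw [hM]
      simp [pvDge]
  · -- existence of a key attaining mc1 in t
    intro htne
    split
    · rename_i hfire
      obtain ⟨hA, hB⟩ := hcond.mp hfire
      rcases Nat.lt_or_ge 1 ((x :: t).count k0) with hM2 | hM2
      · -- max ≥ 2 : x itself now attains max-1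
        have hxt : x ∈ t := List.count_pos_iff.mp (by omega)
        refine ⟨x, hxt, ?_⟩
        rw [← hk0c]
        omega
      · -- max = 1 and the condition fired: t must be empty, contradiction
        exfalso
        obtain ⟨u, hu⟩ := List.exists_mem_of_ne_nil t htne
        have hu1 : 1 ≤ t.count u := List.count_pos_iff.mpr hu
        have : 1 ≤ pvDge t ((x :: t).count k0) :=
          pvDge_pos t _ u hu (by omega)
        omega
    · rename_i hfire
      by_cases hA : (x :: t).count k0 = t.count x + 1
      · -- condition failed because some other key still has max count
        have hB : pvDge t ((x :: t).count k0) ≠ 0 := by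
          intro h0
          exact hfire (hcond.mpr ⟨hA, h0⟩)
        have hBpos : 0 < pvDge t ((x :: t).count k0) := Nat.pos_of_ne_zero hB
        unfold pvDge at hBpos
        obtain ⟨u, hu, hcu⟩ := List.countP_pos_iff.mp hBpos
        have hu' : u ∈ t := List.mem_dedup.mp hu
        have hcu' : (x :: t).count k0 ≤ t.count u := by simpa using hcu
        refine ⟨u, hu', ?_⟩
        have h1 : t.count u ≤ (x :: t).count u := by rw [hw_cnt u]; omega
        have h2 : (x :: t).count u ≤ (x :: t).count k0 := by
          have h2' := hub u (List.mem_cons_of_mem _ hu')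
          rw [← hk0c] at h2'
          exact_mod_cast h2'
        have h3 : t.count u = (x :: t).count k0 := by omega
        rw [← hk0c]
        exact_mod_cast congrArg (Nat.cast : Nat → Int) h3
      · -- x did not attain the max: the old witness survives
        have hk0x : k0 ≠ x := by
          intro hk0x
          subst hk0x
          apply hA
          rw [hw_cnt k0, if_pos rfl]
        have hk0t : k0 ∈ t := by
          rcases List.mem_cons.mp hk0w with rfl | ht
          · exact absurd rfl hk0x
          · exact ht
        refine ⟨k0, hk0t, ?_⟩
        rw [← hk0c, hw_cnt k0, if_neg hk0x]
        simp

theorem pvCond_eq (n : Nat) (w : List Int) (pc : PySem.Dict Int Int) (fr : List Int) (mc : Int)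
    (h : pvInv n w pc fr mc) (hne : w ≠ []) : pvCondA pc fr = pvOkB fr mc := by
  obtain ⟨hnd, hmem, hcnt, hlfr, hfr, hub, hemp, hex, hwn⟩ := h
  have hvals : pc.values = pc.keys.map (fun k => pc.getD k 0) :=
    PySem.Dict.values_eq_map_keys pc hnd 0
  obtain ⟨k0, hk0w, hk0c⟩ := hex hne
  have hk0keys : k0 ∈ pc.keys := (hmem k0).mpr hk0w
  have hcntval : ∀ k ∈ w, ((w.count k : Nat) : Int) ∈ pc.values := by
    intro k hk
    rw [hvals]
    exact List.mem_map.mpr ⟨k, (hmem k).mpr hk, hcnt k⟩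
  have hvne : pc.values ≠ [] :=
    List.ne_nil_of_mem (hcntval k0 hk0w)
  obtain ⟨mx, hmx, hmxmem, hmxub⟩ := pvMax?_spec pc.values hvne
  obtain ⟨mn, hmn, hmnmem, hmnlb⟩ := pvMin?_spec pc.values hvne
  have hval_count : ∀ v ∈ pc.values, ∃ k ∈ w, v = ((w.count k : Nat) : Int) := by
    intro v hv
    rw [hvals] at hv
    obtain ⟨k, hk, rfl⟩ := List.mem_map.mp hv
    exact ⟨k, (hmem k).mp hk, hcnt k⟩
  have hmx_eq : mx = mc := by
    apply le_antisymm
    · obtain ⟨k, hk, hveq⟩ := hval_count mx hmxmem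
      rw [hveq, ← hk0c]
      have := hub k hk
      rw [← hk0c] at this
      exact this
    · rw [← hk0c]
      exact hmxub _ (hcntval k0 hk0w)
  obtain ⟨k1, hk1w, hk1c⟩ := hval_count mn hmnmem
  have hmn_lb : ∀ k ∈ w, w.count k1 ≤ w.count k := by
    intro k hk
    have := hmnlb _ (hcntval k hk)
    rw [hk1c] at this
    exact_mod_cast this
  have hM1 : 1 ≤ w.count k0 := List.count_pos_iff.mpr hk0w
  have hMn : w.count k0 ≤ n := le_trans List.count_le_length hwn
  have hm11 : 1 ≤ w.count k1 := List.count_pos_iff.mpr hk1w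
  have hm1M : w.count k1 ≤ w.count k0 := by
    have := hub k1 hk1w
    rw [← hk0c] at this
    exact_mod_cast this
  have hn1 : 1 ≤ n := le_trans (by omega) hMn
  have hfr1' : pvFrG fr 1 = ((pvDge w 1 : Nat) : Int) := by
    have := hfr 1 le_rfl hn1
    simpa using this
  have hfrM : pvFrG fr mc = ((pvDge w (w.count k0) : Nat) : Int) := by
    rw [← hk0c]
    exact hfr _ hM1 hMn
  have hfrm1 : pvFrG fr ((w.count k1 : Nat) : Int) = ((pvDge w (w.count k1) : Nat) : Int) :=
    hfr _ hm11 (le_trans hm1M hMn)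
  have hDmc_pos : 1 ≤ pvDge w (w.count k0) := pvDge_pos _ _ k0 hk0w le_rfl
  -- unfold both conditions
  rw [pvCondA, pvOkB, hmx, hmn]
  simp only [Option.getD_some, hmx_eq, hk1c]
  rw [Bool.eq_iff_iff]
  simp only [Bool.or_eq_true, Bool.and_eq_true, beq_iff_eq, decide_eq_true_eq]
  constructor
  · rintro (h1 | ⟨h1, h2⟩)
    · -- all counts equal: mc = mn
      left
      have hMeq : w.count k0 = w.count k1 := by
        rw [← hk0c] at h1
        exact_mod_cast h1
      have hall : ∀ k ∈ w, w.count k0 ≤ w.count k := by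
        intro k hk
        rw [hMeq]
        exact hmn_lb k hk
      rw [hfrM, hfr1', (pvDge_all_iff w (w.count k0)).mpr hall]
    · -- max = min + 1 and a unique max key
      right
      have hMeq : w.count k0 = w.count k1 + 1 := by
        rw [← hk0c] at h1
        exact_mod_cast h1
      refine ⟨⟨by rw [← hk0c]; exact_mod_cast (by omega : 2 ≤ w.count k0), ?_⟩, ?_⟩
      · rw [hfrM] at h2 ⊢
        exact h2
      · have hsub : mc - 1 = ((w.count k1 : Nat) : Int) := by
          rw [← hk0c, hMeq]
          push_cast
          ring
        rw [hsub, hfrm1, hfr1', (pvDge_all_iff w (w.count k1)).mpr hmn_lb]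
  · rintro (h1 | ⟨⟨h1, h2⟩, h3⟩)
    · -- fr[mc] = fr[1]: every key attains the max, so min = max
      left
      rw [hfrM, hfr1'] at h1
      have hall := (pvDge_all_iff w (w.count k0)).mp (by exact_mod_cast h1)
      have hle := hall k1 hk1w
      have hEq : w.count k0 = w.count k1 := le_antisymm hle hm1M
      rw [← hk0c]
      exact_mod_cast congrArg (Nat.cast : Nat → Int) hEq
    · -- fr[mc] = 1 and fr[mc-1] = fr[1]
      rcases eq_or_ne (w.count k1) (w.count k0) with hMeq | hMne
      · left
        rw [← hk0c]
        exact_mod_cast hMeq.symm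
      · right
        have hM2 : 2 ≤ w.count k0 := by
          rw [← hk0c] at h1
          exact_mod_cast h1
        have hsub : mc - 1 = ((w.count k0 - 1 : Nat) : Int) := by
          rw [← hk0c, Nat.cast_sub hM1]
          simp
        rw [hsub, hfr (w.count k0 - 1) (by omega) (by omega), hfr1'] at h3
        have hall := (pvDge_all_iff w (w.count k0 - 1)).mp (by exact_mod_cast h3)
        have hm1ge : w.count k0 - 1 ≤ w.count k1 := hall k1 hk1w
        have hm1eq : w.count k1 = w.count k0 - 1 := by omega
        constructor
        · rw [← hk0c, hm1eq, Nat.cast_sub hM1]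
          push_cast
          ring
        · rw [hfrM] at h2 ⊢
          exact h2

theorem pvStepA_eq_B_add (pc : PySem.Dict Int Int) (fr : List Int) (mc : Int) (y : Int) :
    pvStepAddA (pc, fr) y = ((pvStepAddB (pc, fr, mc) y).1, (pvStepAddB (pc, fr, mc) y).2.1) := rfl

theorem pvStepA_eq_B_rem (pc : PySem.Dict Int Int) (fr : List Int) (mc : Int) (x : Int) :
    pvStepRemA (pc, fr) x = ((pvStepRemB (pc, fr, mc) x).1, (pvStepRemB (pc, fr, mc) x).2.1) := rfl

theorem pvWindow_cons (a : List Int) (l i : Nat) (hl : 1 ≤ l) (hi : l ≤ i) (hin : i < a.length) :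
    (a.drop (i - l)).take l = pvGetA a (i - l) :: ((a.drop (i - l + 1)).take (l - 1)) := by
  obtain ⟨k, rfl⟩ : ∃ k, l = k + 1 := ⟨l - 1, by omega⟩
  have hlt : i - (k + 1) < a.length := by omega
  rw [List.drop_eq_getElem_cons hlt, List.take_succ_cons]
  congr 1
  simp [pvGetA, List.getD_eq_getElem?_getD, List.getElem?_eq_getElem hlt]

theorem pvWindow_snoc (a : List Int) (l i : Nat) (hl : 1 ≤ l) (hi : l ≤ i) (hin : i < a.length) :
    ((a.drop (i - l + 1)).take (l - 1)) ++ [pvGetA a i] = (a.drop (i + 1 - l)).take l := by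
  obtain ⟨k, rfl⟩ : ∃ k, l = k + 1 := ⟨l - 1, by omega⟩
  have h1 : i + 1 - (k + 1) = i - (k + 1) + 1 := by omega
  rw [h1, List.take_add_one]
  simp only [Nat.add_sub_cancel]
  congr 1
  rw [List.getElem?_drop]
  have h2 : i - (k + 1) + 1 + k = i := by omega
  rw [h2, List.getElem?_eq_getElem hin]
  simp [pvGetA, List.getD_eq_getElem?_getD, List.getElem?_eq_getElem hin]

theorem pvSlide_eq (a : List Int) (n l : Nat) :
    ∀ (m i : Nat) (pc : PySem.Dict Int Int) (fr : List Int) (mc : Int),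
      n - i = m → l ≤ i → i ≤ n → 1 ≤ l → l ≤ n →
      pvInv n ((a.drop (i - l)).take l) pc fr mc → n = a.length →
      pvSlideA a n l pc fr i = pvSlideB a n l pc fr mc i := by
  intro m
  induction m with
  | zero =>
    intro i pc fr mc hmi hli hin h1l hln hinv hn
    rw [pvSlideA, pvSlideB, dif_neg (by omega), dif_neg (by omega)]
  | succ m ih =>
    intro i pc fr mc hmi hli hin h1l hln hinv hn
    have hilt : i < n := by omega
    have hilt' : i < a.length := by omega
    rw [pvSlideA, pvSlideB, dif_pos hilt, dif_pos hilt]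
    dsimp only
    have hweq := pvWindow_cons a l i h1l hli hilt'
    rw [hweq] at hinv
    have hrem := pvRem_inv n (pvGetA a (i - l)) ((a.drop (i - l + 1)).take (l - 1)) pc fr mc hinv
    have hlt : ((a.drop (i - l + 1)).take (l - 1)).length < n := by
      have : ((a.drop (i - l + 1)).take (l - 1)).length ≤ l - 1 := List.length_take_le _ _
      omega
    have hadd := pvAdd_inv n ((a.drop (i - l + 1)).take (l - 1))
      (pvStepRemB (pc, fr, mc) (pvGetA a (i - l))).1
      (pvStepRemB (pc, fr, mc) (pvGetA a (i - l))).2.1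
      (pvStepRemB (pc, fr, mc) (pvGetA a (i - l))).2.2
      (pvGetA a i) hrem hlt
    have heta1 : ((pvStepRemB (pc, fr, mc) (pvGetA a (i - l))).1,
        (pvStepRemB (pc, fr, mc) (pvGetA a (i - l))).2.1,
        (pvStepRemB (pc, fr, mc) (pvGetA a (i - l))).2.2) =
        pvStepRemB (pc, fr, mc) (pvGetA a (i - l)) := by simp
    rw [heta1] at hadd
    have hw2 := pvWindow_snoc a l i h1l hli hilt'
    have hA1 : pvStepRemA (pc, fr) (pvGetA a (i - l)) =
        ((pvStepRemB (pc, fr, mc) (pvGetA a (i - l))).1,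
         (pvStepRemB (pc, fr, mc) (pvGetA a (i - l))).2.1) :=
      pvStepA_eq_B_rem pc fr mc _
    rw [hA1]
    have hA2 : pvStepAddA ((pvStepRemB (pc, fr, mc) (pvGetA a (i - l))).1,
        (pvStepRemB (pc, fr, mc) (pvGetA a (i - l))).2.1) (pvGetA a i) =
        ((pvStepAddB (pvStepRemB (pc, fr, mc) (pvGetA a (i - l))) (pvGetA a i)).1,
         (pvStepAddB (pvStepRemB (pc, fr, mc) (pvGetA a (i - l))) (pvGetA a i)).2.1) := by
      rw [pvStepA_eq_B_add _ _ (pvStepRemB (pc, fr, mc) (pvGetA a (i - l))).2.2 _, heta1]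
    rw [hA2]
    have hcond := pvCond_eq n (((a.drop (i - l + 1)).take (l - 1)) ++ [pvGetA a i])
      (pvStepAddB (pvStepRemB (pc, fr, mc) (pvGetA a (i - l))) (pvGetA a i)).1
      (pvStepAddB (pvStepRemB (pc, fr, mc) (pvGetA a (i - l))) (pvGetA a i)).2.1
      (pvStepAddB (pvStepRemB (pc, fr, mc) (pvGetA a (i - l))) (pvGetA a i)).2.2
      hadd (by simp)
    rw [hcond]
    split
    · rfl
    · rw [hw2] at hadd
      exact ih (i + 1)
        (pvStepAddB (pvStepRemB (pc, fr, mc) (pvGetA a (i - l))) (pvGetA a i)).1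
        (pvStepAddB (pvStepRemB (pc, fr, mc) (pvGetA a (i - l))) (pvGetA a i)).2.1
        (pvStepAddB (pvStepRemB (pc, fr, mc) (pvGetA a (i - l))) (pvGetA a i)).2.2
        (by omega) (by omega) (by omega) h1l hln hadd hn

theorem pvBuild_inv (a : List Int) (n : Nat) (hn : n = a.length) :
    ∀ l : Nat, l ≤ n →
      ∃ (pc : PySem.Dict Int Int) (fr : List Int) (mc : Int),
        (List.range l).foldl (fun st i => pvStepAddB st (pvGetA a i))
            (PySem.Dict.empty, List.replicate (n + 1) (0 : Int), (0 : Int)) = (pc, fr, mc) ∧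
        (List.range l).foldl (fun st i => pvStepAddA st (pvGetA a i))
            (PySem.Dict.empty, List.replicate (n + 1) (0 : Int)) = (pc, fr) ∧
        pvInv n (a.take l) pc fr mc := by
  intro l
  induction l with
  | zero =>
    intro _
    refine ⟨PySem.Dict.empty, List.replicate (n + 1) (0 : Int), 0, rfl, rfl, ?_⟩
    refine ⟨by simp [PySem.Dict.keys, PySem.Dict.empty], ?_, ?_, by simp, ?_, by simp, fun _ => rfl,
      by simp, by simp⟩
    · intro k
      simp [PySem.Dict.keys, PySem.Dict.empty]
    · intro k
      simp [PySem.Dict.getD, PySem.Dict.get?, PySem.Dict.empty]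
    · intro c hc1 hcn
      rw [pvFrG_natCast]
      have : c < n + 1 := by omega
      simp [List.getD_eq_getElem?_getD, this, pvDge]
  | succ l ih =>
    intro hln
    obtain ⟨pc, fr, mc, hB, hA, hinv⟩ := ih (by omega)
    have hlt : (a.take l).length < n := by
      rw [List.length_take]
      omega
    have hadd := pvAdd_inv n (a.take l) pc fr mc (pvGetA a l) hinv hlt
    refine ⟨(pvStepAddB (pc, fr, mc) (pvGetA a l)).1,
      (pvStepAddB (pc, fr, mc) (pvGetA a l)).2.1,
      (pvStepAddB (pc, fr, mc) (pvGetA a l)).2.2, ?_, ?_, ?_⟩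
    · rw [List.range_succ, List.foldl_append, List.foldl_cons, List.foldl_nil, hB]
    · rw [List.range_succ, List.foldl_append, List.foldl_cons, List.foldl_nil, hA,
        pvStepA_eq_B_add pc fr mc (pvGetA a l)]
    · have htake : a.take (l + 1) = a.take l ++ [pvGetA a l] := by
        rw [List.take_add_one]
        congr 1
        have hl : l < a.length := by omega
        rw [List.getElem?_eq_getElem hl]
        simp [pvGetA, List.getD_eq_getElem?_getD, List.getElem?_eq_getElem hl]
      rw [htake]
      exact hadd

theorem pvIsBor_eq (a : List Int) (n l : Nat) (hn : n = a.length) (h1 : 1 ≤ l) (h2 : l ≤ n) :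
    pvIsBorA a n l = pvIsBorB a n l := by
  obtain ⟨pc, fr, mc, hB, hA, hinv⟩ := pvBuild_inv a n hn l h2
  rw [pvIsBorA, pvIsBorB, hA, hB]
  dsimp only
  have hne : a.take l ≠ [] := by
    have : (a.take l).length = l := by rw [List.length_take]; omega
    intro habs
    rw [habs] at this
    simp at this
    omega
  rw [pvCond_eq n (a.take l) pc fr mc hinv hne]
  split
  · rfl
  · apply pvSlide_eq a n l (n - l) l pc fr mc rfl le_rfl h2 h1 h2 _ hn
    have : (a.drop (l - l)).take l = a.take l := by simp
    rw [this]
    exact hinv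

theorem pvBS_eq (a : List Int) (n : Nat) (hn : n = a.length) :
    ∀ (m left right : Nat), right - left ≤ m → right ≤ n →
      pvBSA a n left right = pvBSB a n left right := by
  intro m
  induction m with
  | zero =>
    intro left right hm hr
    rw [pvBSA, pvBSB, dif_neg (by omega), dif_neg (by omega)]
  | succ m ih =>
    intro left right hm hr
    by_cases hlr : left < right
    · rw [pvBSA, pvBSB, dif_pos hlr, dif_pos hlr]
      dsimp only
      rw [pvIsBor_eq a n ((left + right + 1) / 2) hn (by omega) (by omega)]
      split
      · exact ih ((left + right + 1) / 2) right (by omega) hr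
      · exact ih left ((left + right + 1) / 2 - 1) (by omega) (by omega)
    · rw [pvBSA, pvBSB, dif_neg hlr, dif_neg hlr]

-- ===== VERDICT (by name: the statement is the Claim_ definition above) =====
theorem boring_check_spec : Claim_equal_boring_check := by
  intro a _
  unfold Spec_boring_check boring_check boring_check_alt
  simp only []
  exact congrArg _ (pvBS_eq a a.length rfl (a.length - 0) 0 a.length le_rfl le_rfl)
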